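-- pv_equiv track=rewrite | github.com/pypi-data/pypi-mirror-403 | packages/qhronology/qhronology-1.0.2-py3-none-any.whl/qhronology/utilities/diagrams.py | assign_connections
-- ===== SOURCE A (Python) =====
-- def partition_systems(systems, boundaries):
--     systems = sorted(list(set(systems)))
--     boundaries = sorted(list(set(boundaries)))
--     partitions = []
--     boundaries[-1] = max(max(systems), max(boundaries))
--     boundaries.sort()
--     for n in boundaries:
--         remaining = list(systems)
--         current = []
--         for m in remaining:
--             if m <= n:
--                 current.append(m)
--                 systems.remove(m)
--         current.sort()
--         partitions.append(current)
--
--     return partitions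
--
-- def assign_connections(systems, targets, controls, anticontrols, boundaries):
--     systems_occupied = list(set(targets + controls + anticontrols))
--     partitions = partition_systems(systems, boundaries)
--     connections_list = [
--         {"upper": "none", "lower": "none", "left": "quantum", "right": "quantum"}
--         for k in systems
--     ]
--
--     for k, partition in enumerate(partitions):
--         partition_occupied = list(set(partition) & set(systems_occupied))
--         for n in partition:
--             if n in range(min(partition_occupied), max(partition_occupied) + 1):
--                 if n != min(partition_occupied):
--                     connections_list[n]["upper"] = "quantum"
--                 if n != max(partition_occupied):
--                     connections_list[n]["lower"] = "quantum"
--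
--     return connections_list
-- ===== SOURCE B (Python) =====
-- def assign_connections(systems, targets, controls, anticontrols, boundaries):
--     occupied = set(targets + controls + anticontrols)
--     ss = sorted(set(systems))
--     bs = sorted(set(boundaries))
--     bs[-1] = max(bs[-1], ss[-1])
--
--     def bucket(m):
--         # first index k with m <= bs[k] (binary search; m <= bs[-1] always holds here)
--         lo, hi = 0, len(bs) - 1
--         while lo < hi:
--             mid = (lo + hi) // 2
--             if bs[mid] < m:
--                 lo = mid + 1
--             else:
--                 hi = mid
--         return lo
--
--     # one pass: per-bucket (min, max) of the occupied systems
--     ext = {}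
--     for s in ss:
--         if s in occupied:
--             k = bucket(s)
--             if k in ext:
--                 lo0, hi0 = ext[k]
--                 ext[k] = (min(lo0, s), max(hi0, s))
--             else:
--                 ext[k] = (s, s)
--
--     # one pass: assign each wire from its bucket's extremes
--     out = [{"upper": "none", "lower": "none", "left": "quantum", "right": "quantum"}
--            for _ in systems]
--     for s in ss:
--         k = bucket(s)
--         if k in ext:
--             lo, hi = ext[k]
--             if lo <= s <= hi:
--                 if s != lo:
--                     out[s]["upper"] = "quantum"
--                 if s != hi:
--                     out[s]["lower"] = "quantum"
--     return out
-- ===== Notes on version B (the rewrite author's own statement) =====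
-- stated objective: alternative
-- what changed: B never builds partition lists: it binary-searches each system's boundary-bucket index, accumulates a dict of per-bucket (min,max) occupied extremes in one pass over the sorted systems, then assigns each wire from its bucket's extremes in a second pass, replacing A's per-boundary rescans of the remaining-systems list (with list.remove) and per-partition set intersections and min/max scans.
import Mathlib
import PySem

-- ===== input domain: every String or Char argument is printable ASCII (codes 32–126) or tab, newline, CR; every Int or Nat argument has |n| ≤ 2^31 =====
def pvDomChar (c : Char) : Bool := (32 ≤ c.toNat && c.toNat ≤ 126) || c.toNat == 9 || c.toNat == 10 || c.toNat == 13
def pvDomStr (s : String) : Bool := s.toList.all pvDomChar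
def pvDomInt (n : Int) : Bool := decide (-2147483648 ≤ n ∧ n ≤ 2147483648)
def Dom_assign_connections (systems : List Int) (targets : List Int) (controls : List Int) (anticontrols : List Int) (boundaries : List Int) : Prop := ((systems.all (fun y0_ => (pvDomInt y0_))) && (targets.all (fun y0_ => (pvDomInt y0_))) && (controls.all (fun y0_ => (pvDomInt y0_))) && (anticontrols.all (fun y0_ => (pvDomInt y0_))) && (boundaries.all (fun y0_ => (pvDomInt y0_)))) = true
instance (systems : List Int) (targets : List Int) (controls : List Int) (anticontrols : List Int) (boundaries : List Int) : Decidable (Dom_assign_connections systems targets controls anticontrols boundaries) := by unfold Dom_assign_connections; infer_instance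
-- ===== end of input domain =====

-- B replaces A's per-boundary rescans of the remaining-systems list (partition lists built
-- with list.remove, per-partition set intersections and min/max) by a binary-search bucket
-- index per system plus a dict of per-bucket occupied extremes built in one pass
-- (objective: alternative algorithm, similar cost on duplicate-heavy inputs).

-- ===== PORT A =====
-- connections_list[n][key] = "quantum"  (negative index wraps; out of range = IndexError, excluded by Pre_)
def pvSetConn (cl : List (PySem.Dict String String)) (n : Int) (key : String) : List (PySem.Dict String String) :=
  match PySem.List.pyIdx? cl.length n with
  | some i => cl.set i (((cl[i]?).getD (PySem.Dict.mk [])).insert key "quantum")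
  | none => cl

-- the body of A's 'if n in range(min(..), max(..) + 1)' block
def pvWriteConn (mn mx : Int) (cl : List (PySem.Dict String String)) (n : Int) : List (PySem.Dict String String) :=
  if mn ≤ n ∧ n < mx + 1 then
    if n ≠ mx then pvSetConn (if n ≠ mn then pvSetConn cl n "upper" else cl) n "lower"
    else (if n ≠ mn then pvSetConn cl n "upper" else cl)
  else cl

-- body of A's inner 'for n in partition' loop (min/max of an empty occupied list = ValueError, excluded by Pre_)
def pvStepConn (occ : List Int) (cl : List (PySem.Dict String String)) (n : Int) : List (PySem.Dict String String) :=
  match PySem.List.min? occ (fun x => x), PySem.List.max? occ (fun x => x) with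
  | some mn, some mx => pvWriteConn mn mx cl n
  | _, _ => cl

-- body of A's 'for k, partition in enumerate(partitions)' loop
def pvStepPart (socc : PySem.Set Int) (cl : List (PySem.Dict String String)) (kp : Int × List Int) : List (PySem.Dict String String) :=
  let partition := kp.2
  let partition_occupied := PySem.Set.inter (PySem.Set.ofList partition) (PySem.Set.ofList socc)
  partition.foldl (pvStepConn partition_occupied) cl

-- body of partition_systems' 'for m in remaining' loop
def pvStepInnerA (n : Int) (cs : List Int × List Int) (m : Int) : List Int × List Int :=
  if m ≤ n then (cs.1 ++ [m], (PySem.List.remove? cs.2 m).getD cs.2) else cs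

-- body of partition_systems' 'for n in boundaries' loop
def pvStepBoundaryA (st : List (List Int) × List Int) (n : Int) : List (List Int) × List Int :=
  let inner := st.2.foldl (pvStepInnerA n) ([], st.2)
  (st.1 ++ [PySem.List.sorted inner.1 (fun x => x) false], inner.2)

-- max()/boundaries[-1] on empty lists raise in Python (excluded by Pre_); the port uses .getD 0 / dropLast there
def partition_systems (systems boundaries : List Int) : List (List Int) :=
  let systems1 := PySem.List.sorted (PySem.Set.ofList systems) (fun x => x) false
  let boundaries1 := PySem.List.sorted (PySem.Set.ofList boundaries) (fun x => x) false
  let m := max ((PySem.List.max? systems1 (fun x => x)).getD 0) ((PySem.List.max? boundaries1 (fun x => x)).getD 0)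
  let boundaries2 := PySem.List.sorted (boundaries1.dropLast ++ [m]) (fun x => x) false
  (boundaries2.foldl pvStepBoundaryA ([], systems1)).1

def assign_connections (systems : List Int) (targets : List Int) (controls : List Int) (anticontrols : List Int) (boundaries : List Int) : List (List (String × String)) :=
  let systems_occupied : PySem.Set Int := PySem.Set.ofList (targets ++ controls ++ anticontrols)
  let partitions := partition_systems systems boundaries
  let connections_list : List (PySem.Dict String String) :=
    systems.map (fun _ => PySem.Dict.mk [("upper", "none"), ("lower", "none"), ("left", "quantum"), ("right", "quantum")])
  ((PySem.List.enumerate partitions).foldl (pvStepPart systems_occupied) connections_list).map (fun d => d.items)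

-- ===== PORT B =====
-- B's 'while lo < hi' binary-search loop (bucket helper); bs[mid] is always in range when
-- reached with 0 ≤ lo ≤ hi < len(bs), so the .getD 0 never supplies a value
def pvBucketLoop (bs : List Int) (m : Int) : Nat → Int → Int → Int
  | 0, lo, _ => lo
  | fuel + 1, lo, hi =>
    if lo < hi then
      if (PySem.List.pyGet? bs (PySem.Int.floordiv (lo + hi) 2)).getD 0 < m then
        pvBucketLoop bs m fuel (PySem.Int.floordiv (lo + hi) 2 + 1) hi
      else
        pvBucketLoop bs m fuel lo (PySem.Int.floordiv (lo + hi) 2)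
    else lo

-- B's bucket(m): first index k with m ≤ bs[k]
def pvBucket (bs : List Int) (m : Int) : Int := pvBucketLoop bs m bs.length 0 ((bs.length : Int) - 1)

-- body of B's first 'for s in ss' loop (per-bucket extremes of the occupied systems)
def pvStepExt (socc : PySem.Set Int) (bs : List Int) (ext : PySem.Dict Int (Int × Int)) (s : Int) : PySem.Dict Int (Int × Int) :=
  if PySem.Set.contains socc s then
    match ext.get? (pvBucket bs s) with
    | some p => ext.insert (pvBucket bs s) (min p.1 s, max p.2 s)
    | none => ext.insert (pvBucket bs s) (s, s)
  else ext

-- the 'if lo <= s <= hi' block of B's second loop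
def pvWriteOut (lo hi : Int) (out : List (PySem.Dict String String)) (s : Int) : List (PySem.Dict String String) :=
  if lo ≤ s ∧ s ≤ hi then
    if s ≠ hi then pvSetConn (if s ≠ lo then pvSetConn out s "upper" else out) s "lower"
    else (if s ≠ lo then pvSetConn out s "upper" else out)
  else out

-- body of B's second 'for s in ss' loop
def pvStepOut (bs : List Int) (ext : PySem.Dict Int (Int × Int)) (out : List (PySem.Dict String String)) (s : Int) : List (PySem.Dict String String) :=
  match ext.get? (pvBucket bs s) with
  | some p => pvWriteOut p.1 p.2 out s
  | none => out

-- bs[-1] / ss[-1] on empty lists raise IndexError in Python (excluded by Pre_): dropLast / .getD 0 there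
def assign_connections_alt (systems : List Int) (targets : List Int) (controls : List Int) (anticontrols : List Int) (boundaries : List Int) : List (List (String × String)) :=
  let occupied : PySem.Set Int := PySem.Set.ofList (targets ++ controls ++ anticontrols)
  let ss := PySem.List.sorted (PySem.Set.ofList systems) (fun x => x) false
  let bs0 := PySem.List.sorted (PySem.Set.ofList boundaries) (fun x => x) false
  let bs := bs0.dropLast ++ [max ((PySem.List.pyGet? bs0 (-1)).getD 0) ((PySem.List.pyGet? ss (-1)).getD 0)]
  let ext := ss.foldl (pvStepExt occupied bs) (PySem.Dict.mk [])
  let out : List (PySem.Dict String String) :=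
    systems.map (fun _ => PySem.Dict.mk [("upper", "none"), ("lower", "none"), ("left", "quantum"), ("right", "quantum")])
  (ss.foldl (pvStepOut bs ext) out).map (fun d => d.items)

-- ===== PRECONDITION & SPEC =====
-- Pre_ excludes exactly the inputs on which A raises: empty systems or boundaries (IndexError /
-- ValueError on max()/[-1]); a partition holding a system but no occupied one (ValueError on
-- min() of an empty list); and a written system index outside [-len(systems), len(systems))
-- (IndexError on connections_list[n]).
def Pre_assign_connections (systems : List Int) (targets : List Int) (controls : List Int) (anticontrols : List Int) (boundaries : List Int) : Prop :=
  systems ≠ [] ∧ boundaries ≠ [] ∧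
  ∀ s ∈ systems,
    (∃ t ∈ systems, t ∈ targets ++ controls ++ anticontrols ∧
        ¬ ∃ b ∈ boundaries, (∃ b2 ∈ boundaries, b < b2) ∧ min s t ≤ b ∧ b < max s t) ∧
    ((∃ t1 ∈ systems, ∃ t2 ∈ systems,
        (t1 ∈ targets ++ controls ++ anticontrols ∧
          ¬ ∃ b ∈ boundaries, (∃ b2 ∈ boundaries, b < b2) ∧ min s t1 ≤ b ∧ b < max s t1) ∧
        (t2 ∈ targets ++ controls ++ anticontrols ∧
          ¬ ∃ b ∈ boundaries, (∃ b2 ∈ boundaries, b < b2) ∧ min s t2 ≤ b ∧ b < max s t2) ∧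
        t1 ≤ s ∧ s ≤ t2 ∧ t1 < t2) →
      -(systems.length : Int) ≤ s ∧ s < (systems.length : Int))
instance (systems : List Int) (targets : List Int) (controls : List Int) (anticontrols : List Int) (boundaries : List Int) : Decidable (Pre_assign_connections systems targets controls anticontrols boundaries) := by unfold Pre_assign_connections; infer_instance

def pvWitness_assign_connections : List Int × List Int × List Int × List Int × List Int :=
  ([0, 1, 2], [0], [2], [], [5])

def Spec_assign_connections (systems : List Int) (targets : List Int) (controls : List Int) (anticontrols : List Int) (boundaries : List Int) (out : List (List (String × String))) : Prop := out = assign_connections_alt systems targets controls anticontrols boundaries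
instance (systems : List Int) (targets : List Int) (controls : List Int) (anticontrols : List Int) (boundaries : List Int) (out : List (List (String × String))) : Decidable (Spec_assign_connections systems targets controls anticontrols boundaries out) := by unfold Spec_assign_connections; infer_instance

-- ===== CLAIM (what is proved, stated in full; the proofs are below) =====
def Claim_equal_assign_connections : Prop := ∀ (systems : List Int) (targets : List Int) (controls : List Int) (anticontrols : List Int) (boundaries : List Int), Dom_assign_connections systems targets controls anticontrols boundaries → Pre_assign_connections systems targets controls anticontrols boundaries → Spec_assign_connections systems targets controls anticontrols boundaries (assign_connections systems targets controls anticontrols boundaries)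

-- ===== LEMMAS AND PROOFS =====

theorem pvWitness_ok :
    Dom_assign_connections pvWitness_assign_connections.1 pvWitness_assign_connections.2.1 pvWitness_assign_connections.2.2.1 pvWitness_assign_connections.2.2.2.1 pvWitness_assign_connections.2.2.2.2 ∧
    Pre_assign_connections pvWitness_assign_connections.1 pvWitness_assign_connections.2.1 pvWitness_assign_connections.2.2.1 pvWitness_assign_connections.2.2.2.1 pvWitness_assign_connections.2.2.2.2 := by
  constructor <;> decide

-- the bucket decomposition both programs compute: successive ≤-prefixes of the system list
def pvParts (bs : List Int) (ss : List Int) : List (List Int) :=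
  match bs with
  | [] => []
  | b :: bs' => ss.filter (fun m => decide (m ≤ b)) :: pvParts bs' (ss.filter (fun m => !decide (m ≤ b)))

def pvRest (bs ss : List Int) : List Int :=
  bs.foldl (fun ss b => ss.filter (fun m => !decide (m ≤ b))) ss

-- extremes of a (sorted) occupied list, as B's ext dict stores them
def pvExtOf : List Int → Option (Int × Int)
  | [] => none
  | x :: t => some (x, t.getLastD x)

theorem pv_foldl_min (x : Int) (t : List Int) (h : (x :: t).Pairwise (· ≤ ·)) :
    t.foldl min x = x := by
  induction t generalizing x with
  | nil => rfl
  | cons y t ih =>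
    rw [List.foldl_cons]
    have hxy : x ≤ y := (List.pairwise_cons.1 h).1 y (by simp)
    rw [min_eq_left hxy]
    exact ih x (by
      rcases List.pairwise_cons.1 h with ⟨h1, h2⟩
      exact List.pairwise_cons.2 ⟨fun z hz => h1 z (by simp [hz]), (List.pairwise_cons.1 h2).2⟩)

theorem pv_foldl_max (t : List Int) : ∀ x : Int, (x :: t).Pairwise (· ≤ ·) →
    some (t.foldl max x) = (x :: t).getLast? := by
  induction t with
  | nil => intro x _; rfl
  | cons y t ih =>
    intro x h
    rw [List.foldl_cons]
    have hxy : x ≤ y := (List.pairwise_cons.1 h).1 y (by simp)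
    rw [max_eq_right hxy, List.getLast?_cons_cons]
    exact ih y (List.pairwise_cons.1 h).2

theorem pv_min?_sorted (l : List Int) (h : l.Pairwise (· ≤ ·)) :
    PySem.List.min? l (fun x => x) = l.head? := by
  cases l with
  | nil => rfl
  | cons x t => rw [PySem.List.min?_id_cons, pv_foldl_min x t h]; rfl

theorem pv_max?_sorted (l : List Int) (h : l.Pairwise (· ≤ ·)) :
    PySem.List.max? l (fun x => x) = l.getLast? := by
  cases l with
  | nil => rfl
  | cons x t => rw [PySem.List.max?_id_cons, pv_foldl_max t x h]

theorem pv_pyGet?_neg_one {α : Type} (l : List α) : PySem.List.pyGet? l (-1) = l.getLast? := by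
  cases l with
  | nil => rfl
  | cons x t =>
    have h1 : PySem.List.pyIdx? (x :: t).length (-1) = some t.length := by
      simp only [PySem.List.pyIdx?, List.length_cons]
      norm_num
    simp only [PySem.List.pyGet?, h1, Option.bind_some]
    rw [List.getLast?_eq_getElem?]
    simp

-- ---- A's partition_systems computes pvParts ----

theorem pvA_inner (n : Int) : ∀ (cur pre acc : List Int), cur.Nodup → (∀ m ∈ cur, m ∉ pre) →
    cur.foldl (pvStepInnerA n) (acc, pre ++ cur) =
      (acc ++ cur.filter (fun m => decide (m ≤ n)), pre ++ cur.filter (fun m => !decide (m ≤ n))) := by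
  intro cur
  induction cur with
  | nil => intro pre acc _ _; simp
  | cons x cur ih =>
    intro pre acc hnd hpre
    rw [List.foldl_cons]
    by_cases hx : x ≤ n
    · have hrm : PySem.List.remove? (pre ++ x :: cur) x = some (pre ++ cur) := by
        rw [PySem.List.remove?_eq_some_erase _ x (by simp)]
        rw [List.erase_append_right _ (hpre x (by simp)), List.erase_cons_head]
      have hstep : pvStepInnerA n (acc, pre ++ x :: cur) x = (acc ++ [x], pre ++ cur) := by
        simp [pvStepInnerA, hx, hrm]
      rw [hstep, ih pre (acc ++ [x]) (List.nodup_cons.1 hnd).2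
            (fun m hm => hpre m (by simp [hm]))]
      rw [List.filter_cons, List.filter_cons]
      simp [hx]
    · have hstep : pvStepInnerA n (acc, pre ++ x :: cur) x = (acc, pre ++ x :: cur) := by
        simp [pvStepInnerA, hx]
      rw [hstep]
      have hre : pre ++ x :: cur = (pre ++ [x]) ++ cur := by simp
      rw [hre, ih (pre ++ [x]) acc (List.nodup_cons.1 hnd).2
            (fun m hm => by
              simp only [List.mem_append, List.mem_singleton]
              rintro (h | rfl)
              · exact hpre m (by simp [hm]) h
              · exact (List.nodup_cons.1 hnd).1 hm)]
      rw [List.filter_cons, List.filter_cons]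
      simp [hx]

theorem pvA_outer : ∀ (bs ss : List Int) (acc : List (List Int)), ss.Pairwise (· < ·) →
    bs.foldl pvStepBoundaryA (acc, ss) = (acc ++ pvParts bs ss, pvRest bs ss) := by
  intro bs
  induction bs with
  | nil => intro ss acc _; simp [pvParts, pvRest]
  | cons b bs ih =>
    intro ss acc hss
    rw [List.foldl_cons]
    have hnd : ss.Nodup := hss.imp ne_of_lt
    have hin := pvA_inner b ss [] [] hnd (by simp)
    have hstep : pvStepBoundaryA (acc, ss) b =
        (acc ++ [ss.filter (fun m => decide (m ≤ b))], ss.filter (fun m => !decide (m ≤ b))) := by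
      simp only [pvStepBoundaryA]
      rw [show ss.foldl (pvStepInnerA b) ([], ss) = ss.foldl (pvStepInnerA b) ([], [] ++ ss) by simp,
          hin]
      simp [PySem.List.sorted_eq_self_of_pairwise _ _ ((hss.imp le_of_lt).filter _)]
    rw [hstep, ih _ _ (hss.filter _)]
    simp [pvParts, pvRest]

theorem pvParts_sublist : ∀ (bs ss : List Int), ∀ p ∈ pvParts bs ss, p.Sublist ss := by
  intro bs
  induction bs with
  | nil => intro ss p hp; simp [pvParts] at hp
  | cons b bs ih =>
    intro ss p hp
    rcases (List.mem_cons).1 hp with rfl | hp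
    · exact List.filter_sublist
    · exact (ih _ p hp).trans List.filter_sublist

-- ---- structure of pvParts : indexed membership, flatten ----

theorem pvParts_mem_idx : ∀ (bs ss : List Int) (k : Nat) (t : Int),
    t ∈ (pvParts bs ss).getD k [] →
    t ∈ ss ∧ k < bs.length ∧ (∀ i : Nat, i < k → bs.getD i 0 < t) ∧ t ≤ bs.getD k 0 := by
  intro bs
  induction bs with
  | nil => intro ss k t ht; simp [pvParts] at ht
  | cons b bs ih =>
    intro ss k t ht
    cases k with
    | zero =>
      simp only [pvParts, List.getD_cons_zero] at ht
      have := List.mem_filter.1 ht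
      refine ⟨this.1, by simp, by omega, by simpa using this.2⟩
    | succ k =>
      simp only [pvParts, List.getD_cons_succ] at ht
      obtain ⟨hss, hk, hlow, hup⟩ := ih _ k t ht
      have hmem := List.mem_filter.1 hss
      refine ⟨hmem.1, by simpa using hk, ?_, by simpa using hup⟩
      intro i hi
      cases i with
      | zero => simpa using hmem.2
      | succ i => simpa using hlow i (by omega)

theorem pv_filter_split_sorted : ∀ (ss : List Int) (b : Int), ss.Pairwise (· ≤ ·) →
    ss.filter (fun m => decide (m ≤ b)) ++ ss.filter (fun m => !decide (m ≤ b)) = ss := by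
  intro ss
  induction ss with
  | nil => intro b _; rfl
  | cons x t ih =>
    intro b h
    by_cases hx : x ≤ b
    · rw [List.filter_cons, List.filter_cons]
      simp only [hx, decide_true, Bool.not_true, if_pos]
      simpa using ih b (List.pairwise_cons.1 h).2
    · have hall : ∀ y ∈ t, ¬ (y ≤ b) := fun y hy hyb =>
        hx (le_trans ((List.pairwise_cons.1 h).1 y hy) hyb)
      have h1 : (x :: t).filter (fun m => decide (m ≤ b)) = [] := by
        rw [List.filter_eq_nil_iff]
        intro y hy
        rcases List.mem_cons.1 hy with rfl | hy
        · simp [hx]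
        · simp [hall y hy]
      have h2 : (x :: t).filter (fun m => !decide (m ≤ b)) = x :: t := by
        rw [List.filter_eq_self]
        intro y hy
        rcases List.mem_cons.1 hy with rfl | hy
        · simp [hx]
        · simp [hall y hy]
      rw [h1, h2]
      rfl

theorem pvParts_flatten_append : ∀ (bs ss : List Int), ss.Pairwise (· ≤ ·) →
    (pvParts bs ss).flatten ++ pvRest bs ss = ss := by
  intro bs
  induction bs with
  | nil => intro ss _; simp [pvParts, pvRest]
  | cons b bs ih =>
    intro ss h
    have : pvRest (b :: bs) ss = pvRest bs (ss.filter (fun m => !decide (m ≤ b))) := rfl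
    rw [this]
    simp only [pvParts, List.flatten_cons, List.append_assoc]
    rw [ih _ (h.filter _)]
    exact pv_filter_split_sorted ss b h

theorem pvRest_subset : ∀ (bs ss : List Int), ∀ x ∈ pvRest bs ss, x ∈ ss := by
  intro bs
  induction bs with
  | nil => intro ss x hx; simpa [pvRest] using hx
  | cons b bs ih =>
    intro ss x hx
    have : pvRest (b :: bs) ss = pvRest bs (ss.filter (fun m => !decide (m ≤ b))) := rfl
    rw [this] at hx
    exact (List.mem_filter.1 (ih _ x hx)).1

-- ---- binary-search correctness ----

theorem pv_getD_mono (bs : List Int) (h : bs.Pairwise (· ≤ ·)) (i j : Nat)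
    (hij : i ≤ j) (hj : j < bs.length) : bs.getD i 0 ≤ bs.getD j 0 := by
  rcases lt_or_eq_of_le hij with hlt | rfl
  · have := (List.pairwise_iff_getElem.1 h) i j (by omega) hj hlt
    rwa [List.getD_eq_getElem bs 0 (by omega), List.getD_eq_getElem bs 0 hj]
  · exact le_refl _

theorem pvBucketLoop_eq (bs : List Int) (m : Int) (hbs : bs.Pairwise (· ≤ ·)) (K : Int)
    (hlow : ∀ i : Nat, (i : Int) < K → bs.getD i 0 < m)
    (hhi : m ≤ bs.getD K.toNat 0) :
    ∀ (n : Nat) (lo hi : Int), (hi - lo).toNat ≤ n → 0 ≤ lo → lo ≤ K → K ≤ hi →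
      hi < (bs.length : Int) → pvBucketLoop bs m n lo hi = K := by
  intro n
  induction n with
  | zero =>
    intro lo hi hn h0 h1 h2 h3
    show lo = K
    omega
  | succ n ih =>
    intro lo hi hn h0 h1 h2 h3
    show (if lo < hi then
        if (PySem.List.pyGet? bs (PySem.Int.floordiv (lo + hi) 2)).getD 0 < m then
          pvBucketLoop bs m n (PySem.Int.floordiv (lo + hi) 2 + 1) hi
        else
          pvBucketLoop bs m n lo (PySem.Int.floordiv (lo + hi) 2)
      else lo) = K
    by_cases hlh : lo < hi
    · rw [if_pos hlh]
      have hb := PySem.Int.floordiv_two_mid_bounds (lo := lo) (hi := hi) (le_of_lt hlh)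
      have hmidhi : PySem.Int.floordiv (lo + hi) 2 < hi := by
        rw [PySem.Int.floordiv_lt_iff_lt_mul (by omega)]
        omega
      set mid := PySem.Int.floordiv (lo + hi) 2 with hmid
      have hmid0 : 0 ≤ mid := by omega
      have hmidlen : mid.toNat < bs.length := by omega
      have hval : (PySem.List.pyGet? bs mid).getD 0 = bs.getD mid.toNat 0 := by
        rw [PySem.List.pyGet?_of_nonneg bs hmid0, List.getD_eq_getElem?_getD]
      rw [hval]
      by_cases hc : bs.getD mid.toNat 0 < m
      · rw [if_pos hc]
        have hKmid : mid < K := by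
          by_contra hcon
          have hKm : K.toNat ≤ mid.toNat := by omega
          have := pv_getD_mono bs hbs K.toNat mid.toNat hKm hmidlen
          omega
        exact ih (mid + 1) hi (by omega) (by omega) (by omega) h2 h3
      · rw [if_neg hc]
        have hKmid : K ≤ mid := by
          by_contra hcon
          have := hlow mid.toNat (by omega)
          omega
        exact ih lo mid (by omega) h0 h1 hKmid (by omega)
    · rw [if_neg hlh]
      omega

theorem pvBucket_eq (bs : List Int) (m : Int) (hbs : bs.Pairwise (· ≤ ·)) (K : Nat)
    (hKlen : K < bs.length)
    (hlow : ∀ i : Nat, i < K → bs.getD i 0 < m)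
    (hhi : m ≤ bs.getD K 0) :
    pvBucket bs m = (K : Int) := by
  unfold pvBucket
  exact pvBucketLoop_eq bs m hbs K (fun i hi => hlow i (by omega)) (by simpa using hhi)
    bs.length 0 ((bs.length : Int) - 1) (by omega) (by omega) (by omega) (by omega) (by omega)

-- ---- B's first pass computes the per-bucket occupied extremes ----

theorem pvExt_fold_some (socc : PySem.Set Int) (bs : List Int) (key : Int) :
    ∀ (p : List Int) (ext : PySem.Dict Int (Int × Int)) (lo0 hi0 : Int),
      (∀ s ∈ p, pvBucket bs s = key) → p.Pairwise (· ≤ ·) → (∀ x ∈ p, hi0 ≤ x) → lo0 ≤ hi0 →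
      ext.get? key = some (lo0, hi0) →
      (p.foldl (pvStepExt socc bs) ext).get? key
          = some (lo0, (p.filter (fun x => PySem.Set.contains socc x)).getLastD hi0)
        ∧ ∀ k' ≠ key, (p.foldl (pvStepExt socc bs) ext).get? k' = ext.get? k' := by
  intro p
  induction p with
  | nil => intro ext lo0 hi0 _ _ _ _ hget; exact ⟨by simpa using hget, fun _ _ => rfl⟩
  | cons s p ih =>
    intro ext lo0 hi0 hbkt hsort hge hle hget
    rw [List.foldl_cons]
    by_cases hocc : PySem.Set.contains socc s
    · have hstep : pvStepExt socc bs ext s = ext.insert key (lo0, s) := by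
        unfold pvStepExt
        rw [if_pos hocc, hbkt s (by simp), hget]
        show ext.insert key (min lo0 s, max hi0 s) = ext.insert key (lo0, s)
        rw [min_eq_left (le_trans hle (hge s (by simp))), max_eq_right (hge s (by simp))]
      rw [hstep]
      have hget1 : (ext.insert key (lo0, s)).get? key = some (lo0, s) :=
        PySem.Dict.get?_insert_self _ _ _
      obtain ⟨hA, hB⟩ := ih (ext.insert key (lo0, s)) lo0 s
        (fun t ht => hbkt t (by simp [ht])) (List.pairwise_cons.1 hsort).2
        (fun x hx => (List.pairwise_cons.1 hsort).1 x hx)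
        (le_trans hle (hge s (by simp))) hget1
      constructor
      · rw [hA, List.filter_cons, if_pos (by simpa using hocc), List.getLastD_cons]
      · intro k' hk'
        rw [hB k' hk', PySem.Dict.get?_insert_of_ne _ _ hk']
    · have hstep : pvStepExt socc bs ext s = ext := by
        unfold pvStepExt
        rw [if_neg hocc]
      rw [hstep]
      obtain ⟨hA, hB⟩ := ih ext lo0 hi0 (fun t ht => hbkt t (by simp [ht]))
        (List.pairwise_cons.1 hsort).2 (fun x hx => hge x (by simp [hx])) hle hget
      constructor
      · rw [hA, List.filter_cons, if_neg (by simpa using hocc)]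
      · exact hB

theorem pvExt_fold_none (socc : PySem.Set Int) (bs : List Int) (key : Int) :
    ∀ (p : List Int) (ext : PySem.Dict Int (Int × Int)),
      (∀ s ∈ p, pvBucket bs s = key) → p.Pairwise (· ≤ ·) → ext.get? key = none →
      (p.foldl (pvStepExt socc bs) ext).get? key
          = pvExtOf (p.filter (fun x => PySem.Set.contains socc x))
        ∧ ∀ k' ≠ key, (p.foldl (pvStepExt socc bs) ext).get? k' = ext.get? k' := by
  intro p
  induction p with
  | nil => intro ext _ _ hget; exact ⟨by simpa [pvExtOf] using hget, fun _ _ => rfl⟩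
  | cons s p ih =>
    intro ext hbkt hsort hget
    rw [List.foldl_cons]
    by_cases hocc : PySem.Set.contains socc s
    · have hstep : pvStepExt socc bs ext s = ext.insert key (s, s) := by
        unfold pvStepExt
        rw [if_pos hocc, hbkt s (by simp), hget]
      rw [hstep]
      have hget1 : (ext.insert key (s, s)).get? key = some (s, s) :=
        PySem.Dict.get?_insert_self _ _ _
      obtain ⟨hA, hB⟩ := pvExt_fold_some socc bs key p (ext.insert key (s, s)) s s
        (fun t ht => hbkt t (by simp [ht])) (List.pairwise_cons.1 hsort).2
        (fun x hx => (List.pairwise_cons.1 hsort).1 x hx) (le_refl s) hget1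
      constructor
      · rw [hA, List.filter_cons, if_pos (by simpa using hocc)]
        rfl
      · intro k' hk'
        rw [hB k' hk', PySem.Dict.get?_insert_of_ne _ _ hk']
    · have hstep : pvStepExt socc bs ext s = ext := by
        unfold pvStepExt
        rw [if_neg hocc]
      rw [hstep]
      obtain ⟨hA, hB⟩ := ih ext (fun t ht => hbkt t (by simp [ht]))
        (List.pairwise_cons.1 hsort).2 hget
      constructor
      · rw [hA, List.filter_cons, if_neg (by simpa using hocc)]
      · exact hB

theorem pvExt_fold_untouched (socc : PySem.Set Int) (bs : List Int) :
    ∀ (l : List Int) (ext : PySem.Dict Int (Int × Int)) (k' : Int),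
      (∀ s ∈ l, pvBucket bs s ≠ k') →
      (l.foldl (pvStepExt socc bs) ext).get? k' = ext.get? k' := by
  intro l
  induction l with
  | nil => intro ext k' _; rfl
  | cons s l ih =>
    intro ext k' h
    rw [List.foldl_cons, ih _ k' (fun t ht => h t (by simp [ht]))]
    unfold pvStepExt
    by_cases hocc : PySem.Set.contains socc s
    · rw [if_pos hocc]
      have hne : k' ≠ pvBucket bs s := fun he => h s (by simp) he.symm
      cases hg : ext.get? (pvBucket bs s) with
      | none => exact PySem.Dict.get?_insert_of_ne _ _ hne
      | some q => exact PySem.Dict.get?_insert_of_ne _ _ hne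
    · rw [if_neg hocc]

theorem pvPass1 (socc : PySem.Set Int) (bs : List Int) :
    ∀ (L : List (List Int)) (j : Int) (ext : PySem.Dict Int (Int × Int)),
      (∀ (k : Nat) (s : Int), s ∈ L.getD k [] → pvBucket bs s = j + k) →
      (∀ k : Nat, (L.getD k []).Pairwise (· ≤ ·)) →
      (∀ k : Nat, ext.get? (j + k) = none) →
      ∀ k : Nat, ((L.flatten).foldl (pvStepExt socc bs) ext).get? (j + k)
          = pvExtOf ((L.getD k []).filter (fun x => PySem.Set.contains socc x)) := by
  intro L
  induction L with
  | nil =>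
    intro j ext _ _ h3 k
    simp only [List.flatten_nil, List.foldl_nil, List.getD_nil, List.filter_nil]
    rw [h3 k]
    rfl
  | cons p L ih =>
    intro j ext h1 h2 h3 k
    rw [List.flatten_cons, List.foldl_append]
    have hp1 : ∀ s ∈ p, pvBucket bs s = j := by
      intro s hs
      have := h1 0 s (by simpa using hs)
      simpa using this
    have hkey0 : ext.get? j = none := by simpa using h3 0
    obtain ⟨hA, hB⟩ := pvExt_fold_none socc bs j p ext hp1 (by simpa using h2 0) hkey0
    set ext1 := p.foldl (pvStepExt socc bs) ext with hext1
    have huntouched : ∀ s ∈ L.flatten, pvBucket bs s ≠ j := by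
      intro s hs
      obtain ⟨q, hq, hsq⟩ := List.mem_flatten.1 hs
      obtain ⟨i, hi, rfl⟩ := List.getElem_of_mem hq
      have : pvBucket bs s = j + ((i + 1 : Nat) : Int) := by
        apply h1 (i + 1) s
        rw [List.getD_cons_succ, List.getD_eq_getElem _ _ hi]
        exact hsq
      rw [this]
      intro hcon
      omega
    cases k with
    | zero =>
      simp only [Nat.cast_zero, add_zero, List.getD_cons_zero]
      rw [pvExt_fold_untouched socc bs L.flatten ext1 j huntouched]
      exact hA
    | succ k =>
      have hidx : j + ((k + 1 : Nat) : Int) = (j + 1) + (k : Int) := by push_cast; ring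
      rw [hidx]
      rw [ih (j + 1) ext1 ?h1' ?h2' ?h3' k]
      · simp
      case h1' =>
        intro k' s hs
        have := h1 (k' + 1) s (by simpa using hs)
        rw [this]
        push_cast
        ring
      case h2' =>
        intro k'
        simpa using h2 (k' + 1)
      case h3' =>
        intro k'
        rw [hB ((j + 1) + (k' : Int)) (by omega)]
        have : (j + 1) + (k' : Int) = j + ((k' + 1 : Nat) : Int) := by push_cast; ring
        rw [this]
        exact h3 (k' + 1)

-- ---- B's second pass: one step equals A's inner step ----

theorem pv_getLast?_cons (x : Int) (t : List Int) : (x :: t).getLast? = some (t.getLastD x) := by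
  induction t generalizing x with
  | nil => rfl
  | cons y t ih => rw [List.getLast?_cons_cons, ih, List.getLastD_cons]

theorem pvStepOut_eq (bs : List Int) (ext : PySem.Dict Int (Int × Int)) (occp : List Int)
    (s : Int) (o : List (PySem.Dict String String))
    (hb : ext.get? (pvBucket bs s) = pvExtOf occp) (hs : occp.Pairwise (· ≤ ·)) :
    pvStepOut bs ext o s = pvStepConn occp o s := by
  cases occp with
  | nil =>
    simp only [pvExtOf] at hb
    simp only [pvStepOut, hb]
    rfl
  | cons x t =>
    have hmin : PySem.List.min? (x :: t) (fun y => y) = some x := by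
      rw [pv_min?_sorted _ hs]; rfl
    have hmax : PySem.List.max? (x :: t) (fun y => y) = some (t.getLastD x) := by
      rw [pv_max?_sorted _ hs, pv_getLast?_cons]
    simp only [pvExtOf] at hb
    simp only [pvStepOut, hb, pvStepConn, hmin, hmax]
    unfold pvWriteOut pvWriteConn
    by_cases h1 : x ≤ s ∧ s ≤ t.getLastD x
    · rw [if_pos h1, if_pos (show x ≤ s ∧ s < t.getLastD x + 1 by omega)]
    · rw [if_neg h1, if_neg (show ¬ (x ≤ s ∧ s < t.getLastD x + 1) by omega)]

theorem pv_foldl_congr {α β : Type} : ∀ (l : List β) (f g : α → β → α) (i : α),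
    (∀ a, ∀ x ∈ l, f a x = g a x) → l.foldl f i = l.foldl g i := by
  intro l
  induction l with
  | nil => intro f g i _; rfl
  | cons x l ih =>
    intro f g i h
    rw [List.foldl_cons, List.foldl_cons, h i x (by simp)]
    exact ih f g _ (fun a y hy => h a y (by simp [hy]))

theorem pvPass2 (socc : PySem.Set Int) (bs : List Int) (extF : PySem.Dict Int (Int × Int)) :
    ∀ (L : List (List Int)) (j : Int) (out : List (PySem.Dict String String)),
      (∀ (k : Nat) (s : Int), s ∈ L.getD k [] → pvBucket bs s = j + k) →
      (∀ k : Nat, extF.get? (j + k)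
          = pvExtOf ((L.getD k []).filter (fun x => PySem.Set.contains socc x))) →
      (∀ k : Nat, (L.getD k []).Pairwise (· ≤ ·)) →
      (L.flatten).foldl (pvStepOut bs extF) out
        = L.foldl (fun o p => p.foldl (pvStepConn (p.filter (fun x => PySem.Set.contains socc x))) o) out := by
  intro L
  induction L with
  | nil => intro j out _ _ _; rfl
  | cons p L ih =>
    intro j out h1 h2 h3
    rw [List.flatten_cons, List.foldl_append, List.foldl_cons]
    have hinner : p.foldl (pvStepOut bs extF) out
        = p.foldl (pvStepConn (p.filter (fun x => PySem.Set.contains socc x))) out := by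
      apply pv_foldl_congr
      intro a s hsp
      apply pvStepOut_eq
      · have hbkt : pvBucket bs s = j := by
          have := h1 0 s (by simpa using hsp)
          simpa using this
        rw [hbkt]
        have := h2 0
        simpa using this
      · exact ((by simpa using h3 0 : p.Pairwise (· ≤ ·)).filter _)
    rw [hinner]
    apply ih (j + 1)
    · intro k s hs
      have := h1 (k + 1) s (by simpa using hs)
      rw [this]; push_cast; ring
    · intro k
      have hidx : (j + 1) + (k : Int) = j + ((k + 1 : Nat) : Int) := by push_cast; ring
      rw [hidx]
      simpa using h2 (k + 1)
    · intro k
      simpa using h3 (k + 1)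

-- ---- A's partition loop in the same per-part fold form ----

theorem pvA_fold (socc : PySem.Set Int) (hso : PySem.Set.ofList socc = socc) :
    ∀ (L : List (List Int)) (i : Int) (o : List (PySem.Dict String String)),
      (∀ p ∈ L, p.Nodup) →
      (PySem.List.enumerate L i).foldl (pvStepPart socc) o
        = L.foldl (fun o p => p.foldl (pvStepConn (p.filter (fun x => PySem.Set.contains socc x))) o) o := by
  intro L
  induction L with
  | nil => intro i o _; rfl
  | cons p L ih =>
    intro i o hnd
    rw [PySem.List.enumerate_cons, List.foldl_cons, List.foldl_cons]
    have hstep : pvStepPart socc o (i, p)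
        = p.foldl (pvStepConn (p.filter (fun x => PySem.Set.contains socc x))) o := by
      simp only [pvStepPart]
      rw [PySem.Set.ofList_eq_self_of_nodup _ (hnd p (by simp)), hso]
      rfl
    rw [hstep]
    exact ih (i + 1) _ (fun q hq => hnd q (by simp [hq]))

-- ---- assembling the final theorem ----

theorem pv_sorted_ne_nil {xs : List Int} (h : xs ≠ []) :
    PySem.List.sorted (PySem.Set.ofList xs) (fun x => x) false ≠ [] := by
  intro hnil
  cases xs with
  | nil => exact h rfl
  | cons x t =>
    have hx : x ∈ PySem.List.sorted (PySem.Set.ofList (x :: t)) (fun x => x) false := by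
      rw [PySem.List.mem_sorted]
      exact (PySem.Set.mem_ofList _ _).2 (by simp)
    rw [hnil] at hx
    simp at hx

theorem assign_connections_spec_aux (systems targets controls anticontrols boundaries : List Int)
    (hpre : Pre_assign_connections systems targets controls anticontrols boundaries) :
    assign_connections systems targets controls anticontrols boundaries =
      assign_connections_alt systems targets controls anticontrols boundaries := by
  obtain ⟨hsysne, hbdne, _⟩ := hpre
  set tca := targets ++ controls ++ anticontrols with htca
  set socc := PySem.Set.ofList tca with hsocc
  set ss := PySem.List.sorted (PySem.Set.ofList systems) (fun x => x) false with hss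
  set bs0 := PySem.List.sorted (PySem.Set.ofList boundaries) (fun x => x) false with hbs0
  have hssP : ss.Pairwise (· < ·) := PySem.List.sorted_ofList_pairwise_lt systems
  have hbsP : bs0.Pairwise (· < ·) := PySem.List.sorted_ofList_pairwise_lt boundaries
  have hssne : ss ≠ [] := pv_sorted_ne_nil hsysne
  have hbsne : bs0 ≠ [] := pv_sorted_ne_nil hbdne
  have hssLe : ss.Pairwise (· ≤ ·) := hssP.imp le_of_lt
  have hbsLe : bs0.Pairwise (· ≤ ·) := hbsP.imp le_of_lt
  have hmaxss : PySem.List.max? ss (fun x => x) = some (ss.getLast hssne) := by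
    rw [pv_max?_sorted ss hssLe, List.getLast?_eq_getLast]
  have hmaxbs : PySem.List.max? bs0 (fun x => x) = some (bs0.getLast hbsne) := by
    rw [pv_max?_sorted bs0 hbsLe, List.getLast?_eq_getLast]
  have hgetss : PySem.List.pyGet? ss (-1) = some (ss.getLast hssne) := by
    rw [pv_pyGet?_neg_one, List.getLast?_eq_getLast]
  have hgetbs : PySem.List.pyGet? bs0 (-1) = some (bs0.getLast hbsne) := by
    rw [pv_pyGet?_neg_one, List.getLast?_eq_getLast]
  have hssmax : ∀ u ∈ ss, u ≤ ss.getLast hssne := fun u hu =>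
    PySem.List.max?_isMax hmaxss u hu
  set M := max (ss.getLast hssne) (bs0.getLast hbsne) with hM
  set bs2 := bs0.dropLast ++ [M] with hbs2
  have hdec : bs0.dropLast ++ [bs0.getLast hbsne] = bs0 := List.dropLast_append_getLast hbsne
  have hdl_lt : ∀ x ∈ bs0.dropLast, x < bs0.getLast hbsne := by
    intro x hx
    have := hdec ▸ hbsP
    rcases List.pairwise_append.1 this with ⟨_, _, hcross⟩
    exact hcross x hx _ (by simp)
  have hbs2P : bs2.Pairwise (· ≤ ·) := by
    rw [hbs2]
    refine List.pairwise_append.2 ⟨?_, by simp, ?_⟩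
    · exact hbsLe.sublist (List.dropLast_sublist bs0)
    · intro x hx y hy
      rw [List.mem_singleton] at hy
      subst hy
      exact le_trans (le_of_lt (hdl_lt x hx)) (le_max_right _ _)
  -- A's partition list
  have hparts : partition_systems systems boundaries = pvParts bs2 ss := by
    simp only [partition_systems]
    rw [← hss, ← hbs0, hmaxss, hmaxbs]
    simp only [Option.getD_some]
    rw [← hM, ← hbs2, PySem.List.sorted_eq_self_of_pairwise bs2 _ hbs2P,
      pvA_outer bs2 ss [] hssP]
    simp
  -- the partitions flatten back to ss
  have hrest : pvRest bs2 ss = [] := by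
    have hsplit : pvRest bs2 ss = (pvRest bs0.dropLast ss).filter (fun m => !decide (m ≤ M)) := by
      simp [pvRest, hbs2, List.foldl_append]
    rw [hsplit, List.filter_eq_nil_iff]
    intro x hx
    have hxss : x ∈ ss := pvRest_subset _ _ x hx
    have : x ≤ M := le_trans (hssmax x hxss) (le_max_left _ _)
    simp [this]
  have hflat : (pvParts bs2 ss).flatten = ss := by
    have := pvParts_flatten_append bs2 ss hssLe
    rw [hrest, List.append_nil] at this
    exact this
  -- parts are sorted sublists of ss
  have hsubl : ∀ k : Nat, ((pvParts bs2 ss).getD k []).Sublist ss := by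
    intro k
    by_cases hk : k < (pvParts bs2 ss).length
    · rw [List.getD_eq_getElem _ _ hk]
      exact pvParts_sublist bs2 ss _ (List.getElem_mem hk)
    · rw [List.getD_eq_default _ _ (by omega)]
      exact List.nil_sublist ss
  have hsorted : ∀ k : Nat, ((pvParts bs2 ss).getD k []).Pairwise (· ≤ ·) :=
    fun k => hssLe.sublist (hsubl k)
  -- bucket correctness on each part
  have hbkt : ∀ (k : Nat) (s : Int), s ∈ (pvParts bs2 ss).getD k [] → pvBucket bs2 s = (0 : Int) + k := by
    intro k s hs
    obtain ⟨_, hk, hlow, hup⟩ := pvParts_mem_idx bs2 ss k s hs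
    rw [pvBucket_eq bs2 s hbs2P k hk hlow hup]
    simp
  have hso : PySem.Set.ofList socc = socc := by
    rw [hsocc]; exact PySem.Set.ofList_ofList tca
  set out0 : List (PySem.Dict String String) :=
    systems.map (fun _ => PySem.Dict.mk [("upper", "none"), ("lower", "none"), ("left", "quantum"), ("right", "quantum")]) with hout0
  -- B's ext dict
  have hempty : ∀ k : Nat, (PySem.Dict.mk ([] : List (Int × (Int × Int)))).get? ((0 : Int) + k) = none := by
    intro k; rfl
  have hext : ∀ k : Nat, (ss.foldl (pvStepExt socc bs2) (PySem.Dict.mk [])).get? ((0 : Int) + k)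
      = pvExtOf (((pvParts bs2 ss).getD k []).filter (fun x => PySem.Set.contains socc x)) := by
    intro k
    rw [show ss.foldl (pvStepExt socc bs2) (PySem.Dict.mk [])
          = ((pvParts bs2 ss).flatten).foldl (pvStepExt socc bs2) (PySem.Dict.mk []) from by
        rw [hflat]]
    exact pvPass1 socc bs2 (pvParts bs2 ss) 0 (PySem.Dict.mk []) hbkt hsorted hempty k
  -- the two sides
  have hAside : assign_connections systems targets controls anticontrols boundaries
      = ((pvParts bs2 ss).foldl
          (fun o p => p.foldl (pvStepConn (p.filter (fun x => PySem.Set.contains socc x))) o) out0).map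
            (fun d => d.items) := by
    simp only [assign_connections]
    rw [← htca, ← hsocc, hparts, ← hout0,
      pvA_fold socc hso (pvParts bs2 ss) 0 out0
        (fun p hp => (hssP.sublist (pvParts_sublist bs2 ss p hp)).imp ne_of_lt)]
  have hBside : assign_connections_alt systems targets controls anticontrols boundaries
      = ((pvParts bs2 ss).foldl
          (fun o p => p.foldl (pvStepConn (p.filter (fun x => PySem.Set.contains socc x))) o) out0).map
            (fun d => d.items) := by
    simp only [assign_connections_alt]
    rw [← htca, ← hsocc, ← hss, ← hbs0, hgetbs, hgetss]
    simp only [Option.getD_some]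
    rw [max_comm (bs0.getLast hbsne) (ss.getLast hssne), ← hM, ← hbs2, ← hout0]
    rw [show ss.foldl (pvStepOut bs2 (ss.foldl (pvStepExt socc bs2) (PySem.Dict.mk []))) out0
          = ((pvParts bs2 ss).flatten).foldl
              (pvStepOut bs2 (ss.foldl (pvStepExt socc bs2) (PySem.Dict.mk []))) out0 by rw [hflat]]
    rw [pvPass2 socc bs2 (ss.foldl (pvStepExt socc bs2) (PySem.Dict.mk []))
      (pvParts bs2 ss) 0 out0 hbkt hext hsorted]
  rw [hAside, hBside]

-- ===== VERDICT (by name: the statement is the Claim_ definition above) =====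
theorem assign_connections_spec : Claim_equal_assign_connections := by
  intro systems targets controls anticontrols boundaries _ hpre
  unfold Spec_assign_connections
  exact assign_connections_spec_aux systems targets controls anticontrols boundaries hpre
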